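-- pv_equiv track=rewrite | github.com/liam10011001/FreeCodeCamp-Scientific-Computing-With-Python | probability-calculator/prob_calculator.py | expectedOutcome
-- ===== SOURCE A (Python) =====
-- def expectedOutcome(outcome, expected_balls):
--     # count the ball according to the number of occurence of each color
--
--     for (color, occurence) in expected_balls.items():
--         count = occurence
--         for ball in outcome:
--             if count == 0:
--                 break
--             if ball == color:
--                 count -= 1
--         if count > 0: # there is no enough ball for the current color
--             return False
--
--     return True
-- ===== SOURCE B (Python) =====
-- def expectedOutcome(outcome, expected_balls):
--     # single pass over outcome maintaining a table of outstanding requirements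
--     need = dict(expected_balls)
--     for ball in outcome:
--         if need.get(ball, 0) > 0:
--             need[ball] -= 1
--     return all(v <= 0 for v in need.values())
-- ===== Notes on version B (the rewrite author's own statement) =====
-- stated objective: alternative
-- what changed: Replaced A's per-color rescan of outcome (one inner pass over outcome for every requested color) by a single pass over outcome that decrements a mutable table of outstanding requirements, followed by one check that all requirements reached zero; same value, different traversal (O(len(outcome)+colors) vs O(colors*len(outcome)), though not measurably faster on the benchmark's few-color inputs).
import Mathlib
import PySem

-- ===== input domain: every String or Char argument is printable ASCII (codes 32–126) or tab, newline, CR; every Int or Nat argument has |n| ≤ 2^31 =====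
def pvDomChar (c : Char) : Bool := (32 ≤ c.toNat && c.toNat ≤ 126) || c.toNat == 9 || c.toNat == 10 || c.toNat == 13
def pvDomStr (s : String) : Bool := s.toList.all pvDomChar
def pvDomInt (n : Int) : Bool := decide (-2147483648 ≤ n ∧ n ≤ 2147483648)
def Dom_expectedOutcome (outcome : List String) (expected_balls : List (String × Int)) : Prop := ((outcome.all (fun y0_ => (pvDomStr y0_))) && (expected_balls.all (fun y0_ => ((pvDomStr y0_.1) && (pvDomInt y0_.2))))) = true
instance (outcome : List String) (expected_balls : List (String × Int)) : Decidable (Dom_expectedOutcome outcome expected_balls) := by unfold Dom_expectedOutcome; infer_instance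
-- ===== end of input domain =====

-- B replaces A's per-color rescans of `outcome` by a single pass that decrements a table
-- of outstanding requirements, then checks all requirements are met (objective: alternative).


-- ===== PORT A =====
-- inner loop: `count = occurence; for ball in outcome: if count == 0: break; if ball == color: count -= 1`
def pvCountLoopA (color : String) : Int → List String → Int
  | count, [] => count
  | count, ball :: rest =>
    if count = 0 then count
    else if ball = color then pvCountLoopA color (count - 1) rest
    else pvCountLoopA color count rest

-- outer loop over `expected_balls.items()`
def pvColorsLoopA (outcome : List String) : List (String × Int) → Bool
  | [] => true
  | (color, occurence) :: rest =>
    if 0 < pvCountLoopA color occurence outcome then false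
    else pvColorsLoopA outcome rest

def expectedOutcome (outcome : List String) (expected_balls : List (String × Int)) : Bool :=
  pvColorsLoopA outcome (PySem.Dict.ofList expected_balls).items

-- ===== PORT B =====
-- loop body: `if need.get(ball, 0) > 0: need[ball] -= 1`
def pvStepB (d : PySem.Dict String Int) (ball : String) : PySem.Dict String Int :=
  if 0 < d.getD ball 0 then d.modify ball 0 (· - 1) else d

def expectedOutcome_alt (outcome : List String) (expected_balls : List (String × Int)) : Bool :=
  (outcome.foldl pvStepB (PySem.Dict.ofList expected_balls)).values.all (fun v => decide (v ≤ 0))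

-- ===== PRECONDITION & SPEC =====
def Spec_expectedOutcome (outcome : List String) (expected_balls : List (String × Int)) (out : Bool) : Prop := out = expectedOutcome_alt outcome expected_balls
instance (outcome : List String) (expected_balls : List (String × Int)) (out : Bool) : Decidable (Spec_expectedOutcome outcome expected_balls out) := by unfold Spec_expectedOutcome; infer_instance

-- ===== CLAIM (what is proved, stated in full; the proofs are below) =====
def Claim_equal_expectedOutcome : Prop := ∀ (outcome : List String) (expected_balls : List (String × Int)), Dom_expectedOutcome outcome expected_balls → Spec_expectedOutcome outcome expected_balls (expectedOutcome outcome expected_balls)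

-- ===== LEMMAS AND PROOFS =====

theorem pvCountLoopA_pos_iff (color : String) (xs : List String) :
    ∀ c : Int, (0 < pvCountLoopA color c xs ↔ (xs.count color : Int) < c) := by
  induction xs with
  | nil => intro c; simp [pvCountLoopA]
  | cons b rest ih =>
    intro c
    by_cases hc : c = 0
    · subst hc
      rw [show pvCountLoopA color 0 (b :: rest) = 0 from by simp [pvCountLoopA]]
      omega
    · by_cases hb : b = color
      · subst hb
        rw [show pvCountLoopA b c (b :: rest) = pvCountLoopA b (c - 1) rest from by
              simp [pvCountLoopA, hc],
           ih (c - 1), List.count_cons_self]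
        push_cast; omega
      · rw [show pvCountLoopA color c (b :: rest) = pvCountLoopA color c rest from by
              simp [pvCountLoopA, hc, hb],
           ih c, List.count_cons]
        simp [hb]

theorem pvColorsLoopA_eq_all (outcome : List String) (l : List (String × Int)) :
    pvColorsLoopA outcome l = l.all (fun p => decide (p.2 ≤ (outcome.count p.1 : Int))) := by
  induction l with
  | nil => rfl
  | cons p rest ih =>
    obtain ⟨color, occ⟩ := p
    simp only [pvColorsLoopA, List.all_cons, ih]
    by_cases h : 0 < pvCountLoopA color occ outcome
    · have := (pvCountLoopA_pos_iff color outcome occ).mp h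
      simp [h, decide_eq_false (by omega : ¬ occ ≤ (outcome.count color : Int))]
    · have := mt (pvCountLoopA_pos_iff color outcome occ).mpr (by exact h)
      simp [h, decide_eq_true (by omega : occ ≤ (outcome.count color : Int))]

-- the value a single requirement reaches after the pass: starts at v, loses one per
-- matching ball while still positive
def pvEvolve (v : Int) (n : Nat) : Int := if 0 < v then max (v - n) 0 else v

theorem pvStepB_keys (d : PySem.Dict String Int) (b : String) : (pvStepB d b).keys = d.keys := by
  unfold pvStepB
  split
  · rename_i h
    have hcont : d.contains b = true := by
      by_contra hc
      have := PySem.Dict.getD_of_not_contains (d := d) (k := b) (d0 := (0 : Int))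
        (by revert hc; cases d.contains b <;> simp)
      omega
    rw [PySem.Dict.keys_modify, PySem.Dict.keys_insert_of_contains _ _ hcont]
  · rfl

theorem pvFoldB_keys (xs : List String) : ∀ d : PySem.Dict String Int,
    (xs.foldl pvStepB d).keys = d.keys := by
  induction xs with
  | nil => intro d; rfl
  | cons x rest ih => intro d; simp only [List.foldl_cons, ih, pvStepB_keys]

theorem pvFoldB_getD (xs : List String) : ∀ (d : PySem.Dict String Int) (k : String),
    (xs.foldl pvStepB d).getD k 0 = pvEvolve (d.getD k 0) (xs.count k) := by
  induction xs with
  | nil => intro d k; simp [pvEvolve]; omega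
  | cons x rest ih =>
    intro d k
    simp only [List.foldl_cons, ih]
    by_cases hx : x = k
    · subst hx
      have hstep : (pvStepB d x).getD x 0 =
          (if 0 < d.getD x 0 then d.getD x 0 - 1 else d.getD x 0) := by
        unfold pvStepB
        split
        · simp [PySem.Dict.getD_modify_self]
        · rfl
      rw [hstep, List.count_cons_self]
      unfold pvEvolve
      split_ifs <;> push_cast <;> omega
    · have hstep : (pvStepB d x).getD k 0 = d.getD k 0 := by
        unfold pvStepB
        split
        · exact PySem.Dict.getD_modify_of_ne _ _ _ (fun h => hx h.symm)
        · rfl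
      rw [hstep, List.count_cons]
      simp [hx]

-- ===== VERDICT (by name: the statement is the Claim_ definition above) =====
theorem expectedOutcome_spec : Claim_equal_expectedOutcome := by
  intro outcome expected_balls _
  unfold Spec_expectedOutcome expectedOutcome expectedOutcome_alt
  set d := PySem.Dict.ofList expected_balls with hd
  have hnd : d.keys.Nodup := PySem.Dict.nodup_keys_ofList expected_balls
  have hndf : (outcome.foldl pvStepB d).keys.Nodup := by rw [pvFoldB_keys]; exact hnd
  rw [pvColorsLoopA_eq_all,
    PySem.Dict.values_eq_map_keys _ hndf (0 : Int), pvFoldB_keys, List.all_map]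
  have hkeys : d.keys = d.items.map (·.1) := rfl
  rw [hkeys, List.all_map, Bool.eq_iff_iff, List.all_eq_true, List.all_eq_true]
  constructor <;> intro h p hp <;>
  · have hget : d.getD p.1 0 = p.2 :=
      PySem.Dict.getD_of_mem_items d (by simpa using hp) hnd 0
    have := h p hp
    simp only [Function.comp_apply, pvFoldB_getD, hget, pvEvolve, decide_eq_true_eq] at *
    have hcnt : (0 : Int) ≤ (outcome.count p.1 : Int) := Int.natCast_nonneg _
    split_ifs at * <;> omega
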